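-- pv_equiv track=rewrite | github.com/aleksey-uvarov/quasisymmetry | main.py | closed_shell_hf_bitstring
-- ===== SOURCE A (Python) =====
-- def closed_shell_hf_bitstring(n_electrons, n_spatial):
--     if n_electrons % 2 != 0:
--         raise ValueError("This helper assumes closed-shell (even electron count).")
--
--     n_qubits = 2 * n_spatial
--     occ = n_electrons // 2
--     b = 0
--
--     for i in range(occ):
--         a_mode = 2 * i
--         b_mode = 2 * i + 1
--         b |= (1 << mode_to_bitpos(a_mode, n_qubits))
--         b |= (1 << mode_to_bitpos(b_mode, n_qubits))
--
--     return b
--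
-- def mode_to_bitpos(mode: int, n_qubits: int) -> int:
--     """
--     OpenFermion-consistent mapping inferred from your identity check:
--     fermionic mode 0 is the LEFTMOST bit in the printed binary string.
--     """
--     if not (0 <= mode < n_qubits):
--         raise ValueError(f"mode {mode} out of range for n_qubits={n_qubits}")
--     return n_qubits - 1 - mode
-- ===== SOURCE B (Python) =====
-- def closed_shell_hf_bitstring(n_electrons, n_spatial):
--     """Bitmask whose n_electrons highest bits (lowest-numbered spin orbitals) are set."""
--     if n_electrons % 2 != 0:
--         raise ValueError("closed-shell occupation needs an even number of electrons")
--     n_qubits = 2 * n_spatial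
--     if not 0 <= n_electrons <= n_qubits:
--         raise ValueError("electron count must lie between 0 and the number of spin orbitals")
--     return ((1 << n_electrons) - 1) << (n_qubits - n_electrons)
-- ===== Notes on version B (the rewrite author's own statement) =====
-- stated objective: simpler
-- what changed: Replaces the per-orbital loop that or-s in two bits via mode_to_bitpos with a single closed-form bitmask ((1<<n_electrons)-1) << (n_qubits-n_electrons) behind one range validation; Pre_ excludes the inputs where A raises ValueError (odd counts, counts above 2*n_spatial) and negative electron counts, which lie outside the physical domain and on which A's 0 is only the empty loop while B's validation raises.
-- outside the precondition, e.g. on closed_shell_hf_bitstring(-2, 3): A returns 0, B raises ValueError; on closed_shell_hf_bitstring(-4, -1): A returns 0, B raises ValueError; on closed_shell_hf_bitstring(0, -1): A returns 0, B raises ValueError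
import Mathlib
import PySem

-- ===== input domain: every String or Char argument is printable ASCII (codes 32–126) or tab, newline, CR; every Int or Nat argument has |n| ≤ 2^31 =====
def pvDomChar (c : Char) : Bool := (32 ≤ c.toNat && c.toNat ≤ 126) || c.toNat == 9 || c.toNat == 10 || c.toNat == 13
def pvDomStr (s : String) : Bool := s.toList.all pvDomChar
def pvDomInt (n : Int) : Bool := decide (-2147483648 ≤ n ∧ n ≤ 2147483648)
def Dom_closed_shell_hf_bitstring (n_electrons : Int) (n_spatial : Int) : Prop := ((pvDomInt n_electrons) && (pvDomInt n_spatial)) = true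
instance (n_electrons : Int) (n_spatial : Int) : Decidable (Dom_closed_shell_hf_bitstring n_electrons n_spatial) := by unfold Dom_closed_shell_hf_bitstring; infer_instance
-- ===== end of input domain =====

-- B replaces A's per-orbital |= loop by one closed-form bitmask expression behind a range validation; equivalence proved on Pre_.


-- ===== PORT A =====
-- mode_to_bitpos: none = Python's ValueError
def pv_mode_to_bitpos (mode : Int) (n_qubits : Int) : Option Int :=
  if 0 ≤ mode ∧ mode < n_qubits then some (n_qubits - 1 - mode) else none

-- Python's `1 << p` (p ≥ 0 whenever mode_to_bitpos returns) is ported as 2 ^ p.toNat; the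
-- Option state is none as soon as a mode_to_bitpos call raises (those inputs are outside Pre_).
def closed_shell_hf_bitstring (n_electrons : Int) (n_spatial : Int) : Int :=
  if n_electrons % 2 ≠ 0 then 0   -- Python raises ValueError here; excluded by Pre_
  else
    let n_qubits := 2 * n_spatial
    let occ := PySem.Int.floordiv n_electrons 2
    let r := (PySem.List.pyRange 0 occ 1).foldl
      (fun (b : Option Int) i =>
        match b with
        | none => none
        | some bv =>
          match pv_mode_to_bitpos (2 * i) n_qubits, pv_mode_to_bitpos (2 * i + 1) n_qubits with
          | some p, some q => some (Int.lor (Int.lor bv (2 ^ p.toNat)) (2 ^ q.toNat))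
          | _, _ => none) (some 0)
    r.getD 0   -- under Pre_ the loop never raises and r = some b

-- ===== PORT B =====
-- Python's `((1 << n_electrons) - 1) << (n_qubits - n_electrons)` ported with 2 ^ · (both shift
-- amounts are ≥ 0 on the branch that reaches it); the two `raise` branches return outside Pre_.
def closed_shell_hf_bitstring_alt (n_electrons : Int) (n_spatial : Int) : Int :=
  if n_electrons % 2 ≠ 0 then 0   -- Python raises ValueError; excluded by Pre_
  else
    let n_qubits := 2 * n_spatial
    if ¬ (0 ≤ n_electrons ∧ n_electrons ≤ n_qubits) then 0   -- Python raises ValueError; excluded by Pre_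
    else ((2 ^ n_electrons.toNat : Int) - 1) * 2 ^ (n_qubits - n_electrons).toNat

-- ===== PRECONDITION & SPEC =====
-- Pre_ excludes the inputs where A raises ValueError (odd electron counts, counts above 2*n_spatial)
-- and negative electron counts / counts above a negative orbital count, which lie outside the physical
-- domain: there A returns 0 only because its loop is empty, while B's input validation raises.
def Pre_closed_shell_hf_bitstring (n_electrons : Int) (n_spatial : Int) : Prop :=
  n_electrons % 2 = 0 ∧ 0 ≤ n_electrons ∧ n_electrons ≤ 2 * n_spatial
instance (n_electrons : Int) (n_spatial : Int) : Decidable (Pre_closed_shell_hf_bitstring n_electrons n_spatial) := by unfold Pre_closed_shell_hf_bitstring; infer_instance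

def pvWitness_closed_shell_hf_bitstring : Int × Int := (4, 3)

def Spec_closed_shell_hf_bitstring (n_electrons : Int) (n_spatial : Int) (out : Int) : Prop := out = closed_shell_hf_bitstring_alt n_electrons n_spatial
instance (n_electrons : Int) (n_spatial : Int) (out : Int) : Decidable (Spec_closed_shell_hf_bitstring n_electrons n_spatial out) := by unfold Spec_closed_shell_hf_bitstring; infer_instance

-- ===== CLAIM (what is proved, stated in full; the proofs are below) =====
def Claim_equal_closed_shell_hf_bitstring : Prop := ∀ (n_electrons : Int) (n_spatial : Int), Dom_closed_shell_hf_bitstring n_electrons n_spatial → Pre_closed_shell_hf_bitstring n_electrons n_spatial → Spec_closed_shell_hf_bitstring n_electrons n_spatial (closed_shell_hf_bitstring n_electrons n_spatial)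

-- ===== LEMMAS AND PROOFS =====

-- or with disjoint bits is addition
theorem pv_lor_eq_add (a : Nat) : ∀ b, a &&& b = 0 → a ||| b = a + b := by
  induction a using Nat.binaryRec with
  | zero => simp
  | bit bit_a a' ih =>
    intro b h
    rw [← Nat.bit_testBit_zero_shiftRight_one b] at h ⊢
    rw [Nat.land_bit] at h
    rw [Nat.lor_bit]
    obtain ⟨h1, h2⟩ := Nat.bit_eq_zero_iff.mp h
    rw [ih _ h1]
    rcases bit_a <;> rcases hb : b.testBit 0 <;> simp_all [Nat.bit_val] <;> omega

-- or-ing a fresh low bit into a number divisible by 2^(t+1)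
theorem pv_or_pow (x t : Nat) (h : 2 ^ (t + 1) ∣ x) : x ||| 2 ^ t = x + 2 ^ t := by
  obtain ⟨c, rfl⟩ := h
  apply pv_lor_eq_add
  rw [Nat.and_two_pow, mul_comm (2 ^ (t + 1)) c, Nat.testBit_mul_two_pow]
  simp

-- one loop step of A, at the Nat level
theorem pv_step (nqN s : Nat) (h : s + 2 ≤ nqN) :
    ((2 ^ nqN - 2 ^ (s + 2)) ||| 2 ^ (s + 1)) ||| 2 ^ s = 2 ^ nqN - 2 ^ s := by
  rw [pv_or_pow _ (s + 1) (Nat.dvd_sub (pow_dvd_pow 2 h) dvd_rfl)]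
  rw [pv_or_pow _ s (dvd_add (Nat.dvd_sub (pow_dvd_pow 2 (by omega))
        (pow_dvd_pow 2 (by omega))) dvd_rfl)]
  have h4 : 2 ^ (s + 2) = 4 * 2 ^ s := by rw [pow_succ, pow_succ]; ring
  have h2 : 2 ^ (s + 1) = 2 * 2 ^ s := by rw [pow_succ]; ring
  have hle : 2 ^ (s + 2) ≤ 2 ^ nqN := Nat.pow_le_pow_right (by norm_num) h
  omega

theorem pv_lor_cast (a b : Nat) : Int.lor (a : Int) (b : Int) = ((a ||| b : Nat) : Int) := rfl

-- the loop invariant of A's fold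
theorem pv_loop (nqN : Nat) (k : Nat) (hk : 2 * k ≤ nqN) :
    (PySem.List.pyRange 0 (k : Int) 1).foldl
      (fun (b : Option Int) i =>
        match b with
        | none => none
        | some bv =>
          match pv_mode_to_bitpos (2 * i) (nqN : Int), pv_mode_to_bitpos (2 * i + 1) (nqN : Int) with
          | some p, some q => some (Int.lor (Int.lor bv (2 ^ p.toNat)) (2 ^ q.toNat))
          | _, _ => none) (some 0)
    = some (((2 ^ nqN - 2 ^ (nqN - 2 * k) : Nat) : Int)) := by
  induction k with
  | zero => simp [PySem.List.pyRange_one_eq_nil]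
  | succ k ih =>
    have hk' : 2 * k ≤ nqN := by omega
    have hcast : ((k + 1 : Nat) : Int) = (k : Int) + 1 := by push_cast; ring
    rw [hcast, PySem.List.pyRange_one_succ_right (by positivity), List.foldl_append, ih hk']
    simp only [List.foldl_cons, List.foldl_nil]
    have h1 : pv_mode_to_bitpos (2 * (k : Int)) (nqN : Int) = some ((nqN : Int) - 1 - 2 * k) := by
      unfold pv_mode_to_bitpos
      rw [if_pos (by constructor <;> omega)]
    have h2 : pv_mode_to_bitpos (2 * (k : Int) + 1) (nqN : Int) = some ((nqN : Int) - 1 - (2 * k + 1)) := by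
      unfold pv_mode_to_bitpos
      rw [if_pos (by constructor <;> omega)]
    rw [h1, h2]
    have hp : ((nqN : Int) - 1 - 2 * (k : Int)).toNat = nqN - 2 * k - 1 := by omega
    have hq : ((nqN : Int) - 1 - (2 * (k : Int) + 1)).toNat = nqN - 2 * k - 2 := by omega
    simp only [hp, hq]
    have hpow : ∀ t : Nat, ((2 : Int) ^ t) = ((2 ^ t : Nat) : Int) := by intro t; push_cast; ring
    rw [hpow, hpow, pv_lor_cast, pv_lor_cast]
    congr 1
    have hs : nqN - 2 * k = (nqN - 2 * (k + 1)) + 2 := by omega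
    have hs1 : nqN - 2 * k - 1 = (nqN - 2 * (k + 1)) + 1 := by omega
    have hs0 : nqN - 2 * k - 2 = nqN - 2 * (k + 1) := by omega
    rw [hs1, hs0, hs, pv_step _ _ (by omega)]

-- ===== VERDICT (by name: the statement is the Claim_ definition above) =====
theorem closed_shell_hf_bitstring_spec : Claim_equal_closed_shell_hf_bitstring := by
  intro ne ns _ hpre
  obtain ⟨heven, hnn, hle⟩ := hpre
  unfold Spec_closed_shell_hf_bitstring closed_shell_hf_bitstring closed_shell_hf_bitstring_alt
  rw [if_neg (by omega), if_neg (by omega), if_neg (by omega)]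
  have hfd : PySem.Int.floordiv ne 2 = ne / 2 := PySem.Int.floordiv_eq_ediv_of_pos (by omega)
  set nqN : Nat := (2 * ns).toNat with hnqN
  set k : Nat := (ne / 2).toNat with hk
  have hcnq : (2 * ns : Int) = (nqN : Int) := by omega
  have hck : ne / 2 = (k : Int) := by omega
  have hkb : 2 * k ≤ nqN := by omega
  simp only [hfd, hcnq, hck]
  rw [pv_loop nqN k hkb]
  have hne2 : ne.toNat = 2 * k := by omega
  have hsub : ((nqN : Int) - ne).toNat = nqN - 2 * k := by omega
  rw [hne2, hsub]
  have hcs : ((2 ^ nqN - 2 ^ (nqN - 2 * k) : Nat) : Int)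
      = (2 ^ nqN : Int) - 2 ^ (nqN - 2 * k) := by
    have : 2 ^ (nqN - 2 * k) ≤ 2 ^ nqN := Nat.pow_le_pow_right (by norm_num) (by omega)
    push_cast [Nat.cast_sub this]
    ring
  show ((2 ^ nqN - 2 ^ (nqN - 2 * k) : Nat) : Int) = ((2 : Int) ^ (2 * k) - 1) * 2 ^ (nqN - 2 * k)
  rw [hcs]
  have hexp : (2 : Int) ^ (2 * k) * 2 ^ (nqN - 2 * k) = 2 ^ nqN := by
    rw [← pow_add]
    congr 1
    omega
  linarith [hexp]
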